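-- pv_equiv track=rewrite | github.com/AnimatedRNG/mcm-2017 | cascades.py | num_sols
-- ===== SOURCE A (Python) =====
-- def num_sols(num_in, num_out):
--     # Assumes num_out > 1
--     if num_in == num_out:
--         return 1
--     elif num_in == num_out + 1:
--         return 3 * num_out - 1
--     else:
--         prev = num_sols(num_in - 1, num_out)
--         return (3 * num_in - 4) * prev + (num_in - 2) * num_sols(num_in - 2, num_out)
-- ===== SOURCE B (Python) =====
-- def num_sols(num_in, num_out):
--     # Bottom-up DP with a rolling pair instead of double-branching recursion.
--     if num_in == num_out:
--         return 1
--     a, b = 1, 3 * num_out - 1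
--     for k in range(num_out + 2, num_in + 1):
--         a, b = b, (3 * k - 4) * b + (k - 2) * a
--     return b
-- ===== Notes on version B (the rewrite author's own statement) =====
-- stated objective: alternative
-- what changed: Replaced the double-branching exponential recursion by a bottom-up loop carrying a rolling pair of consecutive values.
import Mathlib
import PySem

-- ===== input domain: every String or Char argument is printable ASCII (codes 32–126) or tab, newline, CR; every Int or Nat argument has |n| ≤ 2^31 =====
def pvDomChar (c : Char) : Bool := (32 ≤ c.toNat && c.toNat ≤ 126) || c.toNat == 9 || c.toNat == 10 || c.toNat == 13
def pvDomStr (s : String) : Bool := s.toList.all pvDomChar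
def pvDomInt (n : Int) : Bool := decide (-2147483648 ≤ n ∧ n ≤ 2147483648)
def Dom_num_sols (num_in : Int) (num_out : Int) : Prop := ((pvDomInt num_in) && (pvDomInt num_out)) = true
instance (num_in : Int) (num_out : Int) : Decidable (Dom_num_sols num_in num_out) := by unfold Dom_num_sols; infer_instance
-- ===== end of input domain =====

-- B computes the same recurrence bottom-up with a rolling pair of consecutive values instead of A's double-branching recursion.

-- ===== PORT A =====
-- A's recursion, made total with fuel (fuel only bounds depth; inside Pre_ it never runs out).
def num_sols_go : Nat → Int → Int → Int
  | 0, _, _ => 0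
  | fuel+1, num_in, num_out =>
    if num_in = num_out then 1
    else if num_in = num_out + 1 then 3 * num_out - 1
    else (3 * num_in - 4) * num_sols_go fuel (num_in - 1) num_out
         + (num_in - 2) * num_sols_go fuel (num_in - 2) num_out

def num_sols (num_in : Int) (num_out : Int) : Int :=
  num_sols_go ((num_in - num_out).toNat + 1) num_in num_out

-- ===== PORT B =====
def num_sols_alt (num_in : Int) (num_out : Int) : Int :=
  if num_in = num_out then 1
  else
    ((PySem.List.pyRange (num_out + 2) (num_in + 1) 1).foldl
      (fun (p : Int × Int) k => (p.2, (3 * k - 4) * p.2 + (k - 2) * p.1))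
      (1, 3 * num_out - 1)).2

-- ===== PRECONDITION & SPEC =====
-- Pre_ excludes num_in < num_out, where Python A recurses without a base case and raises RecursionError.
def Pre_num_sols (num_in : Int) (num_out : Int) : Prop := num_out ≤ num_in
instance (num_in : Int) (num_out : Int) : Decidable (Pre_num_sols num_in num_out) := by unfold Pre_num_sols; infer_instance
def pvWitness_num_sols : Int × Int := (6, 2)

def Spec_num_sols (num_in : Int) (num_out : Int) (out : Int) : Prop := out = num_sols_alt num_in num_out
instance (num_in : Int) (num_out : Int) (out : Int) : Decidable (Spec_num_sols num_in num_out out) := by unfold Spec_num_sols; infer_instance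

-- ===== CLAIM (what is proved, stated in full; the proofs are below) =====
def Claim_equal_num_sols : Prop := ∀ (num_in : Int) (num_out : Int), Dom_num_sols num_in num_out → Pre_num_sols num_in num_out → Spec_num_sols num_in num_out (num_sols num_in num_out)

-- ===== LEMMAS AND PROOFS =====
-- the common value at distance d above num_out
def pvS (no : Int) : Nat → Int
  | 0 => 1
  | 1 => 3 * no - 1
  | d+2 => (3 * (no + (d : Int) + 2) - 4) * pvS no (d+1) + (no + (d : Int)) * pvS no d

lemma go_eq_pvS (fuel : Nat) : ∀ (d : Nat) (no : Int), d < fuel →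
    num_sols_go fuel (no + (d : Int)) no = pvS no d := by
  induction fuel with
  | zero => intro d no h; omega
  | succ fuel ih =>
    intro d no h
    match d with
    | 0 => simp [num_sols_go, pvS]
    | 1 =>
      have h1 : ¬ (no + (1 : Int) = no) := by omega
      simp [num_sols_go, pvS, h1]
    | (d+2 : Nat) =>
      have h1 : ¬ (no + ((d : Int) + 2) = no) := by omega
      have h2 : ¬ (no + ((d : Int) + 2) = no + 1) := by omega
      have e1 : no + ((d : Int) + 2) - 1 = no + ((d+1 : Nat) : Int) := by push_cast; ring_nf
      have e2 : no + ((d : Int) + 2) - 2 = no + ((d : Nat) : Int) := by ring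
      have hd1 : d + 1 < fuel := by omega
      have hd2 : d < fuel := by omega
      show num_sols_go (fuel+1) (no + ((d : Int) + 2)) no = _
      rw [num_sols_go, if_neg h1, if_neg h2, e1, e2, ih (d+1) no hd1, ih d no hd2]
      show _ = pvS no (d+2)
      rw [pvS]
      ring

lemma foldl_eq_pvS (no : Int) : ∀ (d : Nat),
    ((PySem.List.pyRange (no + 2) (no + 2 + (d : Int)) 1).foldl
      (fun (p : Int × Int) k => (p.2, (3 * k - 4) * p.2 + (k - 2) * p.1))
      (1, 3 * no - 1)) = (pvS no d, pvS no (d+1)) := by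
  intro d
  induction d with
  | zero =>
    rw [PySem.List.pyRange_one_eq_nil (by omega)]
    simp [pvS]
  | succ d ih =>
    have e : no + 2 + ((d + 1 : Nat) : Int) = (no + 2 + (d : Int)) + 1 := by push_cast; ring
    rw [e, PySem.List.pyRange_one_succ_right (by omega), List.foldl_append, ih]
    simp only [List.foldl_cons, List.foldl_nil]
    show _ = (pvS no (d+1), pvS no (d+2))
    rw [pvS]
    simp only [Prod.mk.injEq]
    exact ⟨trivial, by ring⟩

lemma alt_eq_pvS (no : Int) (d : Nat) : num_sols_alt (no + (d : Int)) no = pvS no d := by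
  match d with
  | 0 => simp [num_sols_alt, pvS]
  | (d+1 : Nat) =>
    have h1 : ¬ (no + ((d : Int) + 1) = no) := by omega
    have e : no + ((d : Int) + 1) + 1 = no + 2 + (d : Int) := by ring
    unfold num_sols_alt
    simp only [Nat.cast_add, Nat.cast_one]
    rw [if_neg h1, e, foldl_eq_pvS no d]

-- ===== VERDICT (by name: the statement is the Claim_ definition above) =====
theorem num_sols_spec : Claim_equal_num_sols := by
  intro ni no _ hpre
  unfold Spec_num_sols num_sols Pre_num_sols at *
  have hd : ni = no + ((ni - no).toNat : Int) := by omega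
  rw [hd, show no + ((ni - no).toNat : Int) - no = ((ni - no).toNat : Int) by ring,
      Int.toNat_natCast, go_eq_pvS _ _ _ (Nat.lt_succ_self _), alt_eq_pvS]
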